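-- pv_equiv track=rewrite | github.com/tsaanghwang/Yime | unicode_pua.py | _build_safe_pua_ranges
-- ===== SOURCE A (Python) =====
-- from typing import Dict, List
--
-- def _build_safe_pua_ranges(used_codepoints: List[int]) -> List[tuple[int, int]]:
--     """基于 BMP PUA 已占用码点计算相对安全的空白区间。"""
--     used_bmp_pua = sorted({codepoint for codepoint in used_codepoints if 0xE000 <= codepoint <= 0xF8FF})
--     if not used_bmp_pua:
--         return [(0xE000, 0xF8FF)]
--
--     safe_ranges: List[tuple[int, int]] = []
--     next_start = 0xE000
--     for codepoint in used_bmp_pua: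
--         if codepoint > next_start:
--             safe_ranges.append((next_start, codepoint - 1))
--         next_start = max(next_start, codepoint + 1)
--
--     if next_start <= 0xF8FF:
--         safe_ranges.append((next_start, 0xF8FF))
--     return safe_ranges
-- ===== SOURCE B (Python) =====
-- from typing import List
--
-- def _build_safe_pua_ranges(used_codepoints: List[int]) -> List[tuple[int, int]]:
--     """Sentinel-padded pairwise gap scan: no accumulator loop, no empty-input special case."""
--     used = sorted({codepoint for codepoint in used_codepoints if 0xE000 <= codepoint <= 0xF8FF})
--     bounds = [0xDFFF] + used + [0xF900]
--     return [(a + 1, b - 1) for a, b in zip(bounds, bounds[1:]) if b - a > 1]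
-- ===== Notes on version B (the rewrite author's own statement) =====
-- stated objective: simpler
-- what changed: Replaces A's accumulator loop (running next_start with max, an empty-input special case and a trailing-range fixup) by a sentinel-padded pairwise gap scan: pad the sorted used points with 0xDFFF and 0xF900 and emit (a+1,b-1) for each adjacent pair with a gap, with no mutable state and no special cases.
import Mathlib
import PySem

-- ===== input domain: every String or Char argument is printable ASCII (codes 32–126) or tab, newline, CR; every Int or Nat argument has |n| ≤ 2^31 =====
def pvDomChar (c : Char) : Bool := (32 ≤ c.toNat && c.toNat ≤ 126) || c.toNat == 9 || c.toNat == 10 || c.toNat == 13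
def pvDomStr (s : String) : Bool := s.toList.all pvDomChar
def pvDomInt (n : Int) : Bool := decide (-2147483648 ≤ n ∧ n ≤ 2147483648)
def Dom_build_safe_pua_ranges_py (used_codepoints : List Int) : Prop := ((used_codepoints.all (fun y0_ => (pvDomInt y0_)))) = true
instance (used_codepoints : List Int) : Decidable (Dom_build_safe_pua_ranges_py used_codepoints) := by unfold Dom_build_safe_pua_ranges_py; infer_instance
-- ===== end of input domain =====

-- B replaces A's accumulator loop (running next_start with max, plus an empty-input special case
-- and a trailing-range fixup) by a sentinel-padded pairwise gap scan over zip(bounds, bounds[1:]);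
-- objective: simpler (no mutable state, no special cases), same cost.

-- ===== PORT A =====
def build_safe_pua_ranges_py (used_codepoints : List Int) : List (Int × Int) :=
  let used_bmp_pua :=
    PySem.List.sorted
      (PySem.Set.ofList (used_codepoints.filter (fun c => decide (0xE000 ≤ c ∧ c ≤ 0xF8FF))))
      (fun x => x) false
  if used_bmp_pua = [] then [(0xE000, 0xF8FF)]
  else
    let st := used_bmp_pua.foldl
      (fun (st : List (Int × Int) × Int) cp =>
        (if cp > st.2 then st.1 ++ [(st.2, cp - 1)] else st.1, max st.2 (cp + 1)))
      ([], 0xE000)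
    if st.2 ≤ 0xF8FF then st.1 ++ [(st.2, 0xF8FF)] else st.1

-- ===== PORT B =====
def build_safe_pua_ranges_py_alt (used_codepoints : List Int) : List (Int × Int) :=
  let used :=
    PySem.List.sorted
      (PySem.Set.ofList (used_codepoints.filter (fun c => decide (0xE000 ≤ c ∧ c ≤ 0xF8FF))))
      (fun x => x) false
  let bounds := [0xDFFF] ++ used ++ [0xF900]
  ((bounds.zip (bounds.drop 1)).filter (fun p => decide (p.2 - p.1 > 1))).map
    (fun p => (p.1 + 1, p.2 - 1))

-- ===== PRECONDITION & SPEC =====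
def Spec_build_safe_pua_ranges_py (used_codepoints : List Int) (out : List (Int × Int)) : Prop := out = build_safe_pua_ranges_py_alt used_codepoints
instance (used_codepoints : List Int) (out : List (Int × Int)) : Decidable (Spec_build_safe_pua_ranges_py used_codepoints out) := by unfold Spec_build_safe_pua_ranges_py; infer_instance

-- ===== CLAIM (what is proved, stated in full; the proofs are below) =====
def Claim_equal_build_safe_pua_ranges_py : Prop := ∀ (used_codepoints : List Int), Dom_build_safe_pua_ranges_py used_codepoints → Spec_build_safe_pua_ranges_py used_codepoints (build_safe_pua_ranges_py used_codepoints)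

-- ===== LEMMAS AND PROOFS =====

-- B's gap list, generalized over the starting point of the scan (proof helper).
def gapsFrom (ns : Int) (l : List Int) : List (Int × Int) :=
  ((((ns - 1) :: (l ++ [0xF900])).zip (l ++ [0xF900])).filter
      (fun p => decide (p.2 - p.1 > 1))).map (fun p => (p.1 + 1, p.2 - 1))

-- A's fold (with the trailing fixup) computes B's pairwise gaps, for any strictly
-- increasing list bounded below by the running start.
theorem foldl_gaps (l : List Int) : ∀ (ns : Int) (acc : List (Int × Int)),
    (∀ x ∈ l, ns ≤ x) → l.Pairwise (· < ·) →
    (let st := l.foldl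
        (fun (st : List (Int × Int) × Int) cp =>
          (if cp > st.2 then st.1 ++ [(st.2, cp - 1)] else st.1, max st.2 (cp + 1)))
        (acc, ns)
     if st.2 ≤ 0xF8FF then st.1 ++ [(st.2, 0xF8FF)] else st.1) = acc ++ gapsFrom ns l := by
  induction l with
  | nil =>
    intro ns acc _ _
    simp only [List.foldl_nil, gapsFrom, List.nil_append, List.zip_cons_cons, List.zip_nil_right,
      List.filter_cons, List.filter_nil]
    by_cases h : ns ≤ 0xF8FF
    · have : ((0xF900 : Int) - (ns - 1) > 1) := by omega
      simp [h, this]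
    · have : ¬ ((0xF900 : Int) - (ns - 1) > 1) := by omega
      simp [h, this]
  | cons c t ih =>
    intro ns acc hlb hp
    have hc : ns ≤ c := hlb c (by simp)
    have hmax : max ns (c + 1) = c + 1 := by omega
    have hlb' : ∀ x ∈ t, c + 1 ≤ x := by
      intro x hx
      have := (List.pairwise_cons.mp hp).1 x hx
      omega
    have ih' := ih (c + 1) (if c > ns then acc ++ [(ns, c - 1)] else acc) hlb'
      (List.pairwise_cons.mp hp).2
    simp only [List.foldl_cons, hmax] at ih' ⊢
    rw [ih']
    have hgf : gapsFrom ns (c :: t) =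
        (if c > ns then [(ns, c - 1)] else []) ++ gapsFrom (c + 1) t := by
      simp only [gapsFrom, List.cons_append, List.zip_cons_cons, List.filter_cons]
      by_cases h : c > ns
      · have : ((c : Int) - (ns - 1) > 1) := by omega
        simp [h, this]
      · have : ¬ ((c : Int) - (ns - 1) > 1) := by omega
        simp [h, this]
    rw [hgf]
    by_cases h : c > ns <;> simp [h]

-- ===== VERDICT (by name: the statement is the Claim_ definition above) =====
theorem build_safe_pua_ranges_py_spec : Claim_equal_build_safe_pua_ranges_py := by
  intro used_codepoints _
  unfold Spec_build_safe_pua_ranges_py build_safe_pua_ranges_py build_safe_pua_ranges_py_alt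
  set S := PySem.List.sorted
      (PySem.Set.ofList (used_codepoints.filter (fun c => decide (0xE000 ≤ c ∧ c ≤ 0xF8FF))))
      (fun x => x) false with hS
  have hp : S.Pairwise (· < ·) := PySem.List.sorted_ofList_pairwise_lt _
  have hlb : ∀ x ∈ S, (0xE000 : Int) ≤ x := by
    intro x hx
    rw [hS, PySem.List.mem_sorted, PySem.Set.mem_ofList, List.mem_filter] at hx
    have := hx.2
    simp at this
    omega
  by_cases h : S = []
  · simp only [h]
    decide
  · have hm := foldl_gaps S 0xE000 [] hlb hp
    simp only [List.nil_append] at hm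
    simp only [if_neg h]
    rw [hm]
    simp only [gapsFrom, List.singleton_append]
    norm_num
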